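-- pv_equiv track=rewrite | github.com/discentem/connect4 | connect4.py | checksub
-- ===== SOURCE A (Python) =====
-- def checksub(list, sublist):
--     count = 0
--     for i in range(len(list)):
--         if list[i] in sublist:
--             count += 1
--         else:
--             count = 0
--         if count >= len(sublist):
--             return True
-- ===== SOURCE B (Python) =====
-- def checksub(list, sublist):
--     k = len(sublist)
--     members = set(sublist)
--     rest = list
--     while rest:
--         window = rest[:k]
--         if len(window) == k and all(x in members for x in window):
--             return True
--         rest = rest[1:]
-- ===== Notes on version B (the rewrite author's own statement) =====
-- stated objective: alternative
-- what changed: Replaced A's single pass with a running consecutive-member counter by a sliding-window scan that, for each suffix of the list, tests whether its first len(sublist) elements all belong to a set built once from sublist; same results including the None no-match and empty-sublist behaviour.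
import Mathlib
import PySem

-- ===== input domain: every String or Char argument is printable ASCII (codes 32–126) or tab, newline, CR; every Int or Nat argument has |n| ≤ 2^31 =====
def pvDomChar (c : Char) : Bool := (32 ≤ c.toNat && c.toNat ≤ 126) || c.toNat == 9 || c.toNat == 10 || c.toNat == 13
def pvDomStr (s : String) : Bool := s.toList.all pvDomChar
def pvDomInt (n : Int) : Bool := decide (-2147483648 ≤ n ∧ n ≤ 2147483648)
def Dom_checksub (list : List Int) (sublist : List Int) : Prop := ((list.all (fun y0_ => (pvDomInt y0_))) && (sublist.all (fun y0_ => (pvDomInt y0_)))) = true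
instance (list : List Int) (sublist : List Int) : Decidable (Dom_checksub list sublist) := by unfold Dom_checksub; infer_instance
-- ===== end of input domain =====

-- B replaces A's running counter with a suffix-by-suffix sliding-window check
-- (test the first len(sublist) elements of each suffix for membership in a set);
-- objective: alternative decomposition, same observable behaviour.

-- ===== PORT A =====
-- A's for-loop over range(len(list)) with the running count, as structural
-- recursion over the list (list[i] in order = the successive heads).
def checksubGoA (sublist : List Int) : List Int → Int → Option Bool
  | [], _ => none
  | x :: tl, count =>
    let count' := if x ∈ sublist then count + 1 else (0 : Int)
    if (sublist.length : Int) ≤ count' then some true else checksubGoA sublist tl count'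

def checksub (list : List Int) (sublist : List Int) : Option Bool :=
  checksubGoA sublist list 0

-- ===== PORT B =====
-- B's while-loop: rest[:k] is PySem.List.slice, rest = rest[1:] is the tail.
def checksubGoB (members : PySem.Set Int) (k : Nat) : List Int → Option Bool
  | [] => none
  | x :: tl =>
    let window := PySem.List.slice (x :: tl) none (some (k : Int))
    if window.length == k && window.all (fun y => PySem.Set.contains members y)
    then some true
    else checksubGoB members k tl

def checksub_alt (list : List Int) (sublist : List Int) : Option Bool :=
  checksubGoB (PySem.Set.ofList sublist) sublist.length list

-- ===== PRECONDITION & SPEC =====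
def Spec_checksub (list : List Int) (sublist : List Int) (out : Option Bool) : Prop := out = checksub_alt list sublist
instance (list : List Int) (sublist : List Int) (out : Option Bool) : Decidable (Spec_checksub list sublist out) := by unfold Spec_checksub; infer_instance

-- ===== CLAIM (what is proved, stated in full; the proofs are below) =====
def Claim_equal_checksub : Prop := ∀ (list : List Int) (sublist : List Int), Dom_checksub list sublist → Spec_checksub list sublist (checksub list sublist)

-- ===== LEMMAS AND PROOFS =====

-- "the window of length sublist.length at the front of l is all members"
def Win (sub l : List Int) : Prop :=
  sub.length ≤ l.length ∧ ∀ y ∈ l.take sub.length, y ∈ sub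

theorem win_of_run (sub tl : List Int) (j : Nat) (hj : sub.length ≤ j)
    (hlen : j ≤ tl.length) (hall : ∀ y ∈ tl.take j, y ∈ sub) : Win sub tl := by
  refine ⟨le_trans hj hlen, fun y hy => hall y ?_⟩
  have h1 : tl.take sub.length = (tl.take j).take sub.length := by
    rw [List.take_take, Nat.min_eq_left hj]
  exact List.take_subset _ _ (h1 ▸ hy)

theorem A_vals (sub : List Int) : ∀ (l : List Int) (c : Int),
    checksubGoA sub l c = none ∨ checksubGoA sub l c = some true := by
  intro l
  induction l with
  | nil => intro c; left; rfl
  | cons x tl ih =>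
    intro c
    simp only [checksubGoA]
    split <;> split
    all_goals first | (right; rfl) | exact ih _

theorem B_vals (m : PySem.Set Int) (k : Nat) : ∀ (l : List Int),
    checksubGoB m k l = none ∨ checksubGoB m k l = some true := by
  intro l
  induction l with
  | nil => left; rfl
  | cons x tl ih =>
    simp only [checksubGoB]
    split
    · right; rfl
    · exact ih

theorem window_cond (sub l : List Int) :
    ((PySem.List.slice l none (some (sub.length : Int))).length == sub.length &&
     (PySem.List.slice l none (some (sub.length : Int))).all
       (fun y => PySem.Set.contains (PySem.Set.ofList sub) y)) = true
    ↔ Win sub l := by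
  rw [PySem.List.slice_to_natCast]
  simp only [Bool.and_eq_true, beq_iff_eq, List.all_eq_true, List.length_take, Win,
    PySem.Set.contains, List.contains_iff_mem]
  constructor
  · rintro ⟨h1, h2⟩
    exact ⟨by omega, fun y hy => (PySem.Set.mem_ofList sub y).mp (h2 y hy)⟩
  · rintro ⟨h1, h2⟩
    exact ⟨by omega, fun y hy => (PySem.Set.mem_ofList sub y).mpr (h2 y hy)⟩

theorem B_char (sub : List Int) (hk : 1 ≤ sub.length) : ∀ (l : List Int),
    checksubGoB (PySem.Set.ofList sub) sub.length l = some true ↔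
      ∃ i, Win sub (l.drop i) := by
  intro l
  induction l with
  | nil =>
    simp only [checksubGoB, List.drop_nil]
    constructor
    · intro h; cases h
    · rintro ⟨i, hw, -⟩; simp only [List.length_nil] at hw; omega
  | cons x tl ih =>
    simp only [checksubGoB]
    by_cases hw : Win sub (x :: tl)
    · rw [if_pos ((window_cond sub (x :: tl)).mpr hw)]
      exact ⟨fun _ => ⟨0, hw⟩, fun _ => rfl⟩
    · rw [if_neg (fun hc => hw ((window_cond sub (x :: tl)).mp hc))]
      rw [ih]
      constructor
      · rintro ⟨i, hi⟩; exact ⟨i + 1, by simpa using hi⟩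
      · rintro ⟨i, hi⟩
        cases i with
        | zero => exact absurd hi hw
        | succ i => exact ⟨i, by simpa using hi⟩

theorem A_char (sub : List Int) (hk : 1 ≤ sub.length) : ∀ (l : List Int) (c : Int), 0 ≤ c →
    (checksubGoA sub l c = some true ↔
      (∃ j : Nat, 1 ≤ j ∧ j ≤ l.length ∧ (∀ y ∈ l.take j, y ∈ sub) ∧
        (sub.length : Int) ≤ c + j) ∨ ∃ i, Win sub (l.drop i)) := by
  intro l
  induction l with
  | nil =>
    intro c hc
    simp only [checksubGoA, List.length_nil, List.drop_nil]
    constructor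
    · intro h; cases h
    · rintro (⟨j, h1, h2, -, -⟩ | ⟨i, hw, -⟩)
      · omega
      · simp only [List.length_nil] at hw; omega
  | cons x tl ih =>
    intro c hc
    by_cases hm : x ∈ sub
    · by_cases ht : (sub.length : Int) ≤ c + 1
      · have hA : checksubGoA sub (x :: tl) c = some true := by
          simp only [checksubGoA, if_pos hm]
          rw [if_pos ht]
        rw [hA]
        constructor
        · intro _
          refine Or.inl ⟨1, le_refl 1, by simp, ?_, by push_cast; omega⟩
          intro y hy
          simp only [List.take_succ_cons, List.take_zero, List.mem_singleton] at hy
          exact hy ▸ hm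
        · intro _; rfl
      · have hA : checksubGoA sub (x :: tl) c = checksubGoA sub tl (c + 1) := by
          simp only [checksubGoA, if_pos hm]
          rw [if_neg ht]
        rw [hA, ih (c + 1) (by omega)]
        constructor
        · rintro (⟨j, h1, h2, h3, h4⟩ | ⟨i, hi⟩)
          · refine Or.inl ⟨j + 1, by omega, by simp; omega, ?_, by push_cast at h4 ⊢; omega⟩
            intro y hy
            simp only [List.take_succ_cons, List.mem_cons] at hy
            rcases hy with rfl | hy
            · exact hm
            · exact h3 y hy
          · exact Or.inr ⟨i + 1, by simpa using hi⟩
        · rintro (⟨j, h1, h2, h3, h4⟩ | ⟨i, hi⟩)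
          · -- j ≥ 1 on x :: tl; peel off the head
            obtain ⟨j', rfl⟩ : ∃ j', j = j' + 1 := ⟨j - 1, by omega⟩
            have h3' : ∀ y ∈ tl.take j', y ∈ sub := by
              intro y hy
              exact h3 y (by simp [List.take_succ_cons, hy])
            by_cases hj1 : 1 ≤ j'
            · refine Or.inl ⟨j', hj1, by simp at h2; omega, h3', by push_cast at h4 ⊢; omega⟩
            · -- j' = 0, so sub.length ≤ c + 1, contradicting ht
              exfalso; apply ht
              have : j' = 0 := by omega
              subst this; push_cast at h4; omega
          · cases i with
            | zero =>
              -- Win sub (x :: tl); its window is x :: take (k-1) tl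
              simp only [List.drop_zero] at hi
              obtain ⟨hlen, hall⟩ := hi
              obtain ⟨k', hk'⟩ : ∃ k', sub.length = k' + 1 := ⟨sub.length - 1, by omega⟩
              have hall' : ∀ y ∈ tl.take k', y ∈ sub := by
                intro y hy
                apply hall
                rw [hk', List.take_succ_cons]
                exact List.mem_cons_of_mem _ hy
              by_cases hk1 : 1 ≤ k'
              · refine Or.inl ⟨k', hk1, ?_, hall', ?_⟩
                · simp at hlen; omega
                · rw [hk']; omega
              · exfalso; apply ht
                have : k' = 0 := by omega
                rw [hk', this]; push_cast; omega
            | succ i => exact Or.inr ⟨i, by simpa using hi⟩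
    · have hA : checksubGoA sub (x :: tl) c = checksubGoA sub tl 0 := by
        simp only [checksubGoA, if_neg hm]
        rw [if_neg (by omega)]
      rw [hA, ih 0 (le_refl 0)]
      constructor
      · rintro (⟨j, h1, h2, h3, h4⟩ | ⟨i, hi⟩)
        · -- a run of length ≥ k at the front of tl is a window in tl
          refine Or.inr ⟨1, ?_⟩
          simp only [List.drop_succ_cons, List.drop_zero]
          exact win_of_run sub tl j (by omega) h2 h3
        · exact Or.inr ⟨i + 1, by simpa using hi⟩
      · rintro (⟨j, h1, h2, h3, h4⟩ | ⟨i, hi⟩)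
        · -- impossible: the run would have to contain x ∉ sub
          exfalso
          apply hm
          apply h3
          obtain ⟨j', rfl⟩ : ∃ j', j = j' + 1 := ⟨j - 1, by omega⟩
          simp [List.take_succ_cons]
        · cases i with
          | zero =>
            -- Win sub (x :: tl) is impossible: its window starts with x ∉ sub
            exfalso
            simp only [List.drop_zero] at hi
            obtain ⟨hlen, hall⟩ := hi
            apply hm
            apply hall
            obtain ⟨k', hk'⟩ : ∃ k', sub.length = k' + 1 := ⟨sub.length - 1, by omega⟩
            rw [hk', List.take_succ_cons]
            exact List.mem_cons_self
          | succ i => exact Or.inr ⟨i, by simpa using hi⟩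

-- ===== VERDICT (by name: the statement is the Claim_ definition above) =====
theorem checksub_spec : Claim_equal_checksub := by
  unfold Claim_equal_checksub Spec_checksub
  intro l sub _
  by_cases hk : sub.length = 0
  · -- empty sublist: both return some true on a nonempty list, none on []
    cases l with
    | nil => rfl
    | cons x tl =>
      have hB : checksub_alt (x :: tl) sub = some true := by
        unfold checksub_alt
        rw [hk]
        simp only [checksubGoB]
        rw [PySem.List.slice_to_natCast]
        simp
      rw [hB]
      by_cases hm : x ∈ sub
      · simp [checksub, checksubGoA, hm, hk]
      · simp [checksub, checksubGoA, hm, hk]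
  · have hk1 : 1 ≤ sub.length := by omega
    have hAc := A_char sub hk1 l 0 (le_refl 0)
    have hBc := B_char sub hk1 l
    simp only [zero_add] at hAc
    rcases A_vals sub l 0 with hA | hA <;> rcases B_vals (PySem.Set.ofList sub) sub.length l with hB | hB
    · unfold checksub checksub_alt; rw [hA, hB]
    · exfalso
      have hw := hBc.mp hB
      have : checksubGoA sub l 0 = some true := hAc.mpr (Or.inr hw)
      rw [hA] at this; cases this
    · exfalso
      rcases hAc.mp hA with ⟨j, h1, h2, h3, h4⟩ | hw
      · have : checksubGoB (PySem.Set.ofList sub) sub.length l = some true :=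
          hBc.mpr ⟨0, by simpa using win_of_run sub l j (by omega) h2 h3⟩
        rw [hB] at this; cases this
      · have : checksubGoB (PySem.Set.ofList sub) sub.length l = some true := hBc.mpr hw
        rw [hB] at this; cases this
    · unfold checksub checksub_alt; rw [hA, hB]
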